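-- pv_equiv track=rewrite | github.com/doocs/leetcode | solution/1400-1499/1420.Build Array Where You Can Find The Maximum Exactly K Comparisons/Solution.py | numOfArrays
-- ===== SOURCE A (Python) =====
-- def numOfArrays(n: int, m: int, k: int) -> int:
--     if k == 0:
--         return 0
--     dp = [[[0] * (m + 1) for _ in range(k + 1)] for _ in range(n + 1)]
--     mod = 10**9 + 7
--     for i in range(1, m + 1):
--         dp[1][1][i] = 1
--     for i in range(2, n + 1):
--         for c in range(1, min(k + 1, i + 1)):
--             for j in range(1, m + 1):
--                 dp[i][c][j] = dp[i - 1][c][j] * j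
--                 for j0 in range(1, j):
--                     dp[i][c][j] += dp[i - 1][c - 1][j0]
--                     dp[i][c][j] %= mod
--     ans = 0
--     for i in range(1, m + 1):
--         ans += dp[n][k][i]
--         ans %= mod
--     return ans
-- ===== SOURCE B (Python) =====
-- def numOfArrays(n: int, m: int, k: int) -> int:
--     mod = 10**9 + 7
--     if k <= 0 or m <= 0 or n <= 0:
--         return 0
--     # f[c][j]: number of arrays of the current length with search cost c and maximum exactly j
--     f = [[0] * (m + 1) for _ in range(k + 1)]
--     for j in range(1, m + 1):
--         f[1][j] = 1
--     for _ in range(2, n + 1):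
--         g = [[0] * (m + 1) for _ in range(k + 1)]
--         for c in range(1, k + 1):
--             pre = 0  # running prefix sum of f[c-1][1..j-1]
--             for j in range(1, m + 1):
--                 g[c][j] = (f[c][j] * j + pre) % mod
--                 pre = (pre + f[c - 1][j]) % mod
--         f = g
--     return sum(f[k][j] for j in range(1, m + 1)) % mod
-- ===== Notes on version B (the rewrite author's own statement) =====
-- stated objective: faster
-- what changed: Replaces the O(m) inner rescan over j0 with a running prefix sum per c-row and a rolling 2D table, giving O(n*k*m) instead of O(n*k*m^2); Pre_ only excludes inputs on which A raises IndexError (m>=1 with n<=0 or k<0 while k!=0), where B returns 0.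
import Mathlib
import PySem

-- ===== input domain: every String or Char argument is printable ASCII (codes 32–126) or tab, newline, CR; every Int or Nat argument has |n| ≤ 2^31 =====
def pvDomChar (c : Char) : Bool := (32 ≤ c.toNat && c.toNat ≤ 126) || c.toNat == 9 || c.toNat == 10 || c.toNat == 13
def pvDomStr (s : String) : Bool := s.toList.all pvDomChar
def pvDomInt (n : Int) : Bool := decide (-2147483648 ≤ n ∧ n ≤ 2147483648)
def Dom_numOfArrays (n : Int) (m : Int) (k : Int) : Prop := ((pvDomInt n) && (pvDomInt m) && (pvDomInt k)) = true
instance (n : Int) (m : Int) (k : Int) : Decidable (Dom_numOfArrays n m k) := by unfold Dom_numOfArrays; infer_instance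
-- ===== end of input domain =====

-- B replaces A's inner rescan over j0 by a running prefix sum and a rolling 2D table (objective: faster).
-- Each Python dp array (0-initialised, mutated in place) is modelled as an association list of
-- writes, read by pvLook3/pvLook2 (first match = last write, default 0); `% pvM` = Python `%` since pvM > 0.

def pvM : Int := 1000000007

def pvLook3 : List ((Int × Int × Int) × Int) → Int → Int → Int → Int
  | [], _, _, _ => 0
  | ((i, c, j), v) :: t, a, b, d => if a = i ∧ b = c ∧ d = j then v else pvLook3 t a b d

def pvLook2 : List ((Int × Int) × Int) → Int → Int → Int
  | [], _, _ => 0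
  | ((c, j), v) :: t, b, d => if b = c ∧ d = j then v else pvLook2 t b d

-- ===== PORT A =====
-- dp[i][c][j] = dp[i-1][c][j]*j; for j0 in range(1,j): dp[i][c][j] += dp[i-1][c-1][j0]; dp[i][c][j] %= mod
def pvAInner (dp : List ((Int × Int × Int) × Int)) (i c j : Int) : Int :=
  (PySem.List.pyRange 1 j 1).foldl (fun v j0 => (v + pvLook3 dp (i-1) (c-1) j0) % pvM)
    (pvLook3 dp (i-1) c j * j)

def pvAUpd (i c : Int) (dp : List ((Int × Int × Int) × Int)) (j : Int) :
    List ((Int × Int × Int) × Int) :=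
  ((i, c, j), pvAInner dp i c j) :: dp

def pvAStepC (m i : Int) (dp : List ((Int × Int × Int) × Int)) (c : Int) :
    List ((Int × Int × Int) × Int) :=
  (PySem.List.pyRange 1 (m+1) 1).foldl (pvAUpd i c) dp

def pvAStepI (k m : Int) (dp : List ((Int × Int × Int) × Int)) (i : Int) :
    List ((Int × Int × Int) × Int) :=
  (PySem.List.pyRange 1 (min (k+1) (i+1)) 1).foldl (pvAStepC m i) dp

-- for i in range(1, m+1): dp[1][1][i] = 1
def pvDP1 (m : Int) : List ((Int × Int × Int) × Int) :=
  (PySem.List.pyRange 1 (m+1) 1).foldl (fun dp i => ((1, 1, i), 1) :: dp) []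

def numOfArrays (n : Int) (m : Int) (k : Int) : Int :=
  if k = 0 then 0
  else
    let dp2 := (PySem.List.pyRange 2 (n+1) 1).foldl (pvAStepI k m) (pvDP1 m)
    (PySem.List.pyRange 1 (m+1) 1).foldl (fun ans i => (ans + pvLook3 dp2 n k i) % pvM) 0

-- ===== PORT B =====
-- g[c][j] = (f[c][j]*j + pre) % mod; pre = (pre + f[c-1][j]) % mod
def pvBUpd (f : List ((Int × Int) × Int)) (c : Int)
    (st : List ((Int × Int) × Int) × Int) (j : Int) : List ((Int × Int) × Int) × Int :=
  (((c, j), (pvLook2 f c j * j + st.2) % pvM) :: st.1,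
   (st.2 + pvLook2 f (c-1) j) % pvM)

def pvBStepC (m : Int) (f : List ((Int × Int) × Int)) (g : List ((Int × Int) × Int)) (c : Int) :
    List ((Int × Int) × Int) :=
  ((PySem.List.pyRange 1 (m+1) 1).foldl (pvBUpd f c) (g, 0)).1

def pvBStepI (k m : Int) (f : List ((Int × Int) × Int)) : List ((Int × Int) × Int) :=
  (PySem.List.pyRange 1 (k+1) 1).foldl (pvBStepC m f) []

-- for j in range(1, m+1): f[1][j] = 1
def pvF1 (m : Int) : List ((Int × Int) × Int) :=
  (PySem.List.pyRange 1 (m+1) 1).foldl (fun f j => ((1, j), 1) :: f) []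

def numOfArrays_alt (n : Int) (m : Int) (k : Int) : Int :=
  if k ≤ 0 ∨ m ≤ 0 ∨ n ≤ 0 then 0
  else
    let fn := (PySem.List.pyRange 2 (n+1) 1).foldl (fun f _ => pvBStepI k m f) (pvF1 m)
    ((PySem.List.pyRange 1 (m+1) 1).foldl (fun s j => s + pvLook2 fn k j) 0) % pvM

-- ===== PRECONDITION & SPEC =====
-- Pre_ excludes exactly the inputs on which A raises IndexError: m ≥ 1 together with k ≠ 0 and (n ≤ 0 or k < 0).
def Pre_numOfArrays (n : Int) (m : Int) (k : Int) : Prop :=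
  k = 0 ∨ m ≤ 0 ∨ (1 ≤ n ∧ 1 ≤ k)
instance (n : Int) (m : Int) (k : Int) : Decidable (Pre_numOfArrays n m k) := by
  unfold Pre_numOfArrays; infer_instance

def pvWitness_numOfArrays : Int × Int × Int := (3, 3, 2)

def Spec_numOfArrays (n : Int) (m : Int) (k : Int) (out : Int) : Prop := out = numOfArrays_alt n m k
instance (n : Int) (m : Int) (k : Int) (out : Int) : Decidable (Spec_numOfArrays n m k out) := by
  unfold Spec_numOfArrays; infer_instance

-- ===== CLAIM (what is proved, stated in full; the proofs are below) =====
def Claim_equal_numOfArrays : Prop := ∀ (n : Int) (m : Int) (k : Int), Dom_numOfArrays n m k → Pre_numOfArrays n m k → Spec_numOfArrays n m k (numOfArrays n m k)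

-- ===== LEMMAS AND PROOFS =====

theorem pvM_pos : (0 : Int) < pvM := by norm_num [pvM]

theorem pvLook3_nil (a b d : Int) : pvLook3 [] a b d = 0 := rfl

theorem pvLook2_nil (b d : Int) : pvLook2 [] b d = 0 := rfl

theorem pvLook3_cons (i c j v : Int) (t : List ((Int × Int × Int) × Int)) (a b d : Int) :
    pvLook3 (((i, c, j), v) :: t) a b d
      = if a = i ∧ b = c ∧ d = j then v else pvLook3 t a b d := rfl

theorem pvLook2_cons (c j v : Int) (t : List ((Int × Int) × Int)) (b d : Int) :
    pvLook2 (((c, j), v) :: t) b d = if b = c ∧ d = j then v else pvLook2 t b d := rfl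

-- (x + y % M) % M = (x + y) % M
theorem pv_add_emod_right (x y : Int) : (x + y % pvM) % pvM = (x + y) % pvM := by
  conv_rhs => rw [Int.add_emod]
  rw [Int.add_emod x (y % pvM), Int.emod_emod_of_dvd _ dvd_rfl]

-- a fold that takes % pvM after each addition equals one final % pvM of the plain sum (nonempty list)
theorem pv_foldl_mod_sum (g : Int → Int) :
    ∀ (l : List Int) (a : Int), l ≠ [] →
      l.foldl (fun acc x => (acc + g x) % pvM) a = (a + (l.map g).sum) % pvM := by
  intro l
  induction l with
  | nil => intro a h; exact absurd rfl h
  | cons x xs ih =>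
    intro a _
    rcases List.eq_nil_or_concat' xs with h | _
    · subst h; simp
    · have hxs : xs ≠ [] := by
        rcases xs with _ | _
        · simp_all
        · simp
      simp only [List.foldl_cons, List.map_cons, List.sum_cons]
      rw [ih ((a + g x) % pvM) hxs, Int.add_emod ((a + g x) % pvM),
          Int.emod_emod_of_dvd _ dvd_rfl, ← Int.add_emod]
      ring_nf

theorem pv_sum_zero (g : Int → Int) (l : List Int) (h : ∀ x ∈ l, g x = 0) :
    (l.map g).sum = 0 := by
  induction l with
  | nil => simp
  | cons x xs ih =>
    simp only [List.map_cons, List.sum_cons, h x (by simp)]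
    rw [ih (fun y hy => h y (by simp [hy]))]; ring

-- characterisation of the initial tables
theorem pvDP1_char (m : Int) (a b d : Int) :
    pvLook3 (pvDP1 m) a b d = if a = 1 ∧ b = 1 ∧ 1 ≤ d ∧ d < m + 1 then 1 else 0 := by
  unfold pvDP1
  have H : ∀ t : Int, ∀ a b d : Int,
      pvLook3 ((PySem.List.pyRange 1 t 1).foldl (fun dp i => ((1, 1, i), 1) :: dp) []) a b d
      = if a = 1 ∧ b = 1 ∧ 1 ≤ d ∧ d < t then 1 else 0 := by
    intro t
    by_cases ht : 1 ≤ t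
    · induction t, ht using Int.le_induction with
      | base =>
        intro a b d
        rw [PySem.List.pyRange_one_eq_nil (by omega)]
        simp only [List.foldl_nil, pvLook3_nil]
        rw [if_neg (by omega)]
      | succ t ht ih =>
        intro a b d
        rw [PySem.List.pyRange_one_succ_right (by omega), List.foldl_append]
        simp only [List.foldl_cons, List.foldl_nil]
        rw [pvLook3_cons, ih a b d]
        split_ifs <;> first | rfl | omega
    · intro a b d
      rw [PySem.List.pyRange_one_eq_nil (by omega)]
      simp only [List.foldl_nil, pvLook3_nil]
      rw [if_neg (by omega)]
  exact H (m+1) a b d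

theorem pvF1_char (m : Int) (b d : Int) :
    pvLook2 (pvF1 m) b d = if b = 1 ∧ 1 ≤ d ∧ d < m + 1 then 1 else 0 := by
  unfold pvF1
  have H : ∀ t : Int, ∀ b d : Int,
      pvLook2 ((PySem.List.pyRange 1 t 1).foldl (fun f j => ((1, j), 1) :: f) []) b d
      = if b = 1 ∧ 1 ≤ d ∧ d < t then 1 else 0 := by
    intro t
    by_cases ht : 1 ≤ t
    · induction t, ht using Int.le_induction with
      | base =>
        intro b d
        rw [PySem.List.pyRange_one_eq_nil (by omega)]
        simp only [List.foldl_nil, pvLook2_nil]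
        rw [if_neg (by omega)]
      | succ t ht ih =>
        intro b d
        rw [PySem.List.pyRange_one_succ_right (by omega), List.foldl_append]
        simp only [List.foldl_cons, List.foldl_nil]
        rw [pvLook2_cons, ih b d]
        split_ifs <;> first | rfl | omega
    · intro b d
      rw [PySem.List.pyRange_one_eq_nil (by omega)]
      simp only [List.foldl_nil, pvLook2_nil]
      rw [if_neg (by omega)]
  exact H (m+1) b d

-- pvAInner depends only on row i-1 of dp
theorem pvAInner_congr (dp dp' : List ((Int × Int × Int) × Int)) (i c j : Int)
    (h : ∀ b d, pvLook3 dp' (i-1) b d = pvLook3 dp (i-1) b d) :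
    pvAInner dp' i c j = pvAInner dp i c j := by
  unfold pvAInner
  rw [h]
  exact PySem.List.foldl_congr_mem _ _ _ _ (fun acc x _ => by rw [h])

theorem pvAUpd_apply (i c : Int) (dp : List ((Int × Int × Int) × Int)) (j a b d : Int) :
    pvLook3 (pvAUpd i c dp j) a b d
      = if a = i ∧ b = c ∧ d = j then pvAInner dp i c j else pvLook3 dp a b d := rfl

-- the inner j-loop of A writes (i,c,d) for 1 ≤ d < t, value computed from the unmodified dp
theorem pvA_jfold (i c : Int) (dp : List ((Int × Int × Int) × Int)) (t : Int) :
    ∀ a b d : Int,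
    pvLook3 ((PySem.List.pyRange 1 t 1).foldl (pvAUpd i c) dp) a b d
      = if a = i ∧ b = c ∧ 1 ≤ d ∧ d < t then pvAInner dp i c d else pvLook3 dp a b d := by
  by_cases ht : 1 ≤ t
  · induction t, ht using Int.le_induction with
    | base =>
      intro a b d
      rw [PySem.List.pyRange_one_eq_nil (by omega)]
      simp only [List.foldl_nil]
      rw [if_neg (by omega)]
    | succ t ht ih =>
      intro a b d
      rw [PySem.List.pyRange_one_succ_right (by omega), List.foldl_append]
      simp only [List.foldl_cons, List.foldl_nil]
      have hrow : ∀ b' d',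
          pvLook3 ((PySem.List.pyRange 1 t 1).foldl (pvAUpd i c) dp) (i-1) b' d'
            = pvLook3 dp (i-1) b' d' := by
        intro b' d'
        rw [ih (i-1) b' d']
        rw [if_neg (by omega)]
      rw [pvAUpd_apply, pvAInner_congr dp _ i c t hrow, ih a b d]
      by_cases h1 : a = i ∧ b = c ∧ d = t
      · rw [if_pos h1, if_pos (show a = i ∧ b = c ∧ 1 ≤ d ∧ d < t + 1 by omega), h1.2.2]
      · rw [if_neg h1]
        by_cases h2 : a = i ∧ b = c ∧ 1 ≤ d ∧ d < t
        · rw [if_pos h2, if_pos (show a = i ∧ b = c ∧ 1 ≤ d ∧ d < t + 1 by omega)]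
        · rw [if_neg h2, if_neg (show ¬(a = i ∧ b = c ∧ 1 ≤ d ∧ d < t + 1) by omega)]
  · intro a b d
    rw [PySem.List.pyRange_one_eq_nil (by omega)]
    simp only [List.foldl_nil]
    rw [if_neg (by omega)]

theorem pvAStepC_apply (m i : Int) (dp : List ((Int × Int × Int) × Int)) (c a b d : Int) :
    pvLook3 (pvAStepC m i dp c) a b d
      = pvLook3 ((PySem.List.pyRange 1 (m+1) 1).foldl (pvAUpd i c) dp) a b d := rfl

-- the c-loop of A: writes row i at (b,d) for 1 ≤ b < u, 1 ≤ d ≤ m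
theorem pvA_cfold (m i : Int) (dp : List ((Int × Int × Int) × Int)) (u : Int) :
    ∀ a b d : Int,
    pvLook3 ((PySem.List.pyRange 1 u 1).foldl (pvAStepC m i) dp) a b d
      = if a = i ∧ 1 ≤ b ∧ b < u ∧ 1 ≤ d ∧ d < m + 1 then pvAInner dp i b d
        else pvLook3 dp a b d := by
  by_cases hu : 1 ≤ u
  · induction u, hu using Int.le_induction with
    | base =>
      intro a b d
      rw [PySem.List.pyRange_one_eq_nil (by omega)]
      simp only [List.foldl_nil]
      rw [if_neg (by omega)]
    | succ u hu ih =>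
      intro a b d
      rw [PySem.List.pyRange_one_succ_right (by omega), List.foldl_append]
      simp only [List.foldl_cons, List.foldl_nil]
      have hrow : ∀ b' d',
          pvLook3 ((PySem.List.pyRange 1 u 1).foldl (pvAStepC m i) dp) (i-1) b' d'
            = pvLook3 dp (i-1) b' d' := by
        intro b' d'
        rw [ih (i-1) b' d']
        rw [if_neg (by omega)]
      rw [pvAStepC_apply, pvA_jfold i u _ (m+1) a b d,
          pvAInner_congr dp _ i u d hrow, ih a b d]
      by_cases h1 : a = i ∧ b = u ∧ 1 ≤ d ∧ d < m + 1
      · rw [if_pos h1, if_pos (show a = i ∧ 1 ≤ b ∧ b < u + 1 ∧ 1 ≤ d ∧ d < m + 1 by omega),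
            h1.2.1]
      · rw [if_neg h1]
        by_cases h2 : a = i ∧ 1 ≤ b ∧ b < u ∧ 1 ≤ d ∧ d < m + 1
        · rw [if_pos h2, if_pos (show a = i ∧ 1 ≤ b ∧ b < u + 1 ∧ 1 ≤ d ∧ d < m + 1 by omega)]
        · rw [if_neg h2,
              if_neg (show ¬(a = i ∧ 1 ≤ b ∧ b < u + 1 ∧ 1 ≤ d ∧ d < m + 1) by omega)]
  · intro a b d
    rw [PySem.List.pyRange_one_eq_nil (by omega)]
    simp only [List.foldl_nil]
    rw [if_neg (by omega)]

-- the prefix sum maintained by B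
def pvP (f : List ((Int × Int) × Int)) (c t : Int) : Int :=
  (PySem.List.pyRange 1 t 1).foldl (fun a j0 => (a + pvLook2 f (c-1) j0) % pvM) 0

def pvBV (f : List ((Int × Int) × Int)) (c j : Int) : Int :=
  (pvLook2 f c j * j + pvP f c j) % pvM

theorem pvBUpd_fst (f : List ((Int × Int) × Int)) (c : Int)
    (st : List ((Int × Int) × Int) × Int) (j b d : Int) :
    pvLook2 (pvBUpd f c st j).1 b d
      = if b = c ∧ d = j then (pvLook2 f c j * j + st.2) % pvM else pvLook2 st.1 b d := rfl

theorem pvBUpd_snd (f : List ((Int × Int) × Int)) (c : Int)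
    (st : List ((Int × Int) × Int) × Int) (j : Int) :
    (pvBUpd f c st j).2 = (st.2 + pvLook2 f (c-1) j) % pvM := rfl

theorem pvB_jfold (f : List ((Int × Int) × Int)) (c : Int) (g : List ((Int × Int) × Int))
    (t : Int) (ht : 1 ≤ t) :
    (∀ b d, pvLook2 ((PySem.List.pyRange 1 t 1).foldl (pvBUpd f c) (g, 0)).1 b d
        = if b = c ∧ 1 ≤ d ∧ d < t then pvBV f c d else pvLook2 g b d)
    ∧ ((PySem.List.pyRange 1 t 1).foldl (pvBUpd f c) (g, 0)).2 = pvP f c t := by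
  induction t, ht using Int.le_induction with
  | base =>
    rw [PySem.List.pyRange_one_eq_nil (by omega)]
    constructor
    · intro b d
      show pvLook2 g b d = _
      rw [if_neg (by omega)]
    · show (0 : Int) = pvP f c 1
      unfold pvP
      rw [PySem.List.pyRange_one_eq_nil (by omega)]
      rfl
  | succ t ht ih =>
    rw [PySem.List.pyRange_one_succ_right (by omega), List.foldl_append]
    simp only [List.foldl_cons, List.foldl_nil]
    obtain ⟨ih1, ih2⟩ := ih
    constructor
    · intro b d
      rw [pvBUpd_fst, ih2, ih1 b d]
      by_cases h : b = c ∧ d = t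
      · rw [if_pos h, if_pos (show b = c ∧ 1 ≤ d ∧ d < t + 1 by omega), h.2]
        rfl
      · rw [if_neg h]
        by_cases h2 : b = c ∧ 1 ≤ d ∧ d < t
        · rw [if_pos h2, if_pos (show b = c ∧ 1 ≤ d ∧ d < t + 1 by omega)]
        · rw [if_neg h2, if_neg (show ¬(b = c ∧ 1 ≤ d ∧ d < t + 1) by omega)]
    · rw [pvBUpd_snd, ih2]
      unfold pvP
      rw [PySem.List.pyRange_one_succ_right (by omega), List.foldl_append]
      simp only [List.foldl_cons, List.foldl_nil]

theorem pvBStepC_char (m : Int) (hm : 1 ≤ m) (f g : List ((Int × Int) × Int)) (c b d : Int) :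
    pvLook2 (pvBStepC m f g c) b d
      = if b = c ∧ 1 ≤ d ∧ d < m + 1 then pvBV f c d else pvLook2 g b d := by
  unfold pvBStepC
  exact (pvB_jfold f c g (m+1) (by omega)).1 b d

theorem pvBStepI_char (k m : Int) (hm : 1 ≤ m) (f : List ((Int × Int) × Int)) :
    ∀ (u : Int) (b d : Int),
      pvLook2 ((PySem.List.pyRange 1 u 1).foldl (pvBStepC m f) []) b d
        = if 1 ≤ b ∧ b < u ∧ 1 ≤ d ∧ d < m + 1 then pvBV f b d else 0 := by
  intro u
  by_cases hu : 1 ≤ u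
  · induction u, hu using Int.le_induction with
    | base =>
      intro b d
      rw [PySem.List.pyRange_one_eq_nil (by omega)]
      simp only [List.foldl_nil, pvLook2_nil]
      rw [if_neg (by omega)]
    | succ u hu ih =>
      intro b d
      rw [PySem.List.pyRange_one_succ_right (by omega), List.foldl_append]
      simp only [List.foldl_cons, List.foldl_nil]
      rw [pvBStepC_char m hm f _ u b d, ih b d]
      by_cases h1 : b = u ∧ 1 ≤ d ∧ d < m + 1
      · rw [if_pos h1, if_pos (show 1 ≤ b ∧ b < u + 1 ∧ 1 ≤ d ∧ d < m + 1 by omega), h1.1]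
      · rw [if_neg h1]
        by_cases h2 : 1 ≤ b ∧ b < u ∧ 1 ≤ d ∧ d < m + 1
        · rw [if_pos h2, if_pos (show 1 ≤ b ∧ b < u + 1 ∧ 1 ≤ d ∧ d < m + 1 by omega)]
        · rw [if_neg h2, if_neg (show ¬(1 ≤ b ∧ b < u + 1 ∧ 1 ≤ d ∧ d < m + 1) by omega)]
  · intro b d
    rw [PySem.List.pyRange_one_eq_nil (by omega)]
    simp only [List.foldl_nil, pvLook2_nil]
    rw [if_neg (by omega)]

def pvBounded (f : List ((Int × Int) × Int)) : Prop :=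
  ∀ b d, 0 ≤ pvLook2 f b d ∧ pvLook2 f b d < pvM

def pvSupp (k m L : Int) (f : List ((Int × Int) × Int)) : Prop :=
  ∀ b d, (1 ≤ b ∧ b ≤ k ∧ b ≤ L ∧ 1 ≤ d ∧ d ≤ m) ∨ pvLook2 f b d = 0

theorem pvP_zero (f : List ((Int × Int) × Int)) (c t : Int)
    (h : ∀ j0, 1 ≤ j0 → j0 < t → pvLook2 f (c-1) j0 = 0) : pvP f c t = 0 := by
  unfold pvP
  by_cases ht : t ≤ 1
  · rw [PySem.List.pyRange_one_eq_nil (by omega)]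
    rfl
  · rw [pv_foldl_mod_sum _ _ 0 (by
        rw [PySem.List.pyRange_one_cons (by omega)]; simp)]
    rw [pv_sum_zero _ _ (fun x hx => h x (PySem.List.mem_pyRange_one.mp hx).1
        (PySem.List.mem_pyRange_one.mp hx).2)]
    simp

theorem pvBV_zero (k m L : Int) (f : List ((Int × Int) × Int)) (hS : pvSupp k m L f)
    (b d : Int) (hb : L + 1 < b) : pvBV f b d = 0 := by
  have h1 : pvLook2 f b d = 0 := by
    rcases hS b d with h | h
    · omega
    · exact h
  have h2 : pvP f b d = 0 := pvP_zero f b d (fun j0 _ _ => by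
    rcases hS (b-1) j0 with h | h
    · omega
    · exact h)
  rw [pvBV, h1, h2]
  simp

-- one step of the main loop: A's new row i = L+1 equals B's new table, invariants preserved
theorem pv_step (k m L : Int) (hm : 1 ≤ m) (hL : 1 ≤ L)
    (dp : List ((Int × Int × Int) × Int)) (f : List ((Int × Int) × Int))
    (hrow : ∀ b d, pvLook3 dp L b d = pvLook2 f b d)
    (hzero : ∀ a b d, L < a → pvLook3 dp a b d = 0)
    (hB : pvBounded f) (hS : pvSupp k m L f) :
    (∀ b d, pvLook3 (pvAStepI k m dp (L+1)) (L+1) b d = pvLook2 (pvBStepI k m f) b d)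
    ∧ (∀ a b d, L + 1 < a → pvLook3 (pvAStepI k m dp (L+1)) a b d = 0)
    ∧ pvBounded (pvBStepI k m f) ∧ pvSupp k m (L+1) (pvBStepI k m f) := by
  have hAchar : ∀ a b d, pvLook3 (pvAStepI k m dp (L+1)) a b d
      = if a = L+1 ∧ 1 ≤ b ∧ b < min (k+1) (L+2) ∧ 1 ≤ d ∧ d < m + 1
        then pvAInner dp (L+1) b d else pvLook3 dp a b d := by
    intro a b d
    unfold pvAStepI
    have h2 : (L+1) + 1 = L+2 := by ring
    rw [h2]
    exact pvA_cfold m (L+1) dp (min (k+1) (L+2)) a b d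
  have hBchar : ∀ b d, pvLook2 (pvBStepI k m f) b d
      = if 1 ≤ b ∧ b < k + 1 ∧ 1 ≤ d ∧ d < m + 1 then pvBV f b d else 0 :=
    fun b d => pvBStepI_char k m hm f (k+1) b d
  -- A's inner value equals B's value in the overlap
  have hval : ∀ b d, 1 ≤ b → b < min (k+1) (L+2) → 1 ≤ d → d < m + 1 →
      pvAInner dp (L+1) b d = pvBV f b d := by
    intro b d hb1 hb2 hd1 hd2
    have hrw : pvAInner dp (L+1) b d
        = (PySem.List.pyRange 1 d 1).foldl
            (fun v j0 => (v + pvLook2 f (b-1) j0) % pvM) (pvLook2 f b d * d) := by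
      unfold pvAInner
      have h1 : (L + 1 - 1 : Int) = L := by ring
      rw [h1, hrow b d]
      exact PySem.List.foldl_congr_mem _ _ _ _ (fun acc x _ => by rw [hrow])
    rw [hrw]
    by_cases hd : d = 1
    · subst hd
      rw [PySem.List.pyRange_one_eq_nil (by omega)]
      simp only [List.foldl_nil]
      have hP : pvP f b 1 = 0 := pvP_zero f b 1 (by omega)
      rw [pvBV, hP, mul_one, add_zero, Int.emod_eq_of_lt (hB b 1).1 (hB b 1).2]
    · have hne : PySem.List.pyRange 1 d 1 ≠ [] := by
        rw [PySem.List.pyRange_one_cons (by omega)]; simp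
      rw [pv_foldl_mod_sum _ _ _ hne]
      have hP : pvP f b d
          = ((PySem.List.pyRange 1 d 1).map (fun j0 => pvLook2 f (b-1) j0)).sum % pvM := by
        unfold pvP
        rw [pv_foldl_mod_sum _ _ 0 hne]
        simp
      rw [pvBV, hP, pv_add_emod_right]
  refine ⟨?_, ?_, ?_, ?_⟩
  · intro b d
    rw [hAchar, hBchar]
    by_cases hin : 1 ≤ b ∧ b < k + 1 ∧ 1 ≤ d ∧ d < m + 1
    · rw [if_pos hin]
      by_cases hov : b < min (k+1) (L+2)
      · rw [if_pos ⟨rfl, hin.1, hov, hin.2.2⟩]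
        exact hval b d hin.1 hov hin.2.2.1 hin.2.2.2
      · rw [if_neg (by omega), hzero (L+1) b d (by omega)]
        exact (pvBV_zero k m L f hS b d (by omega)).symm
    · rw [if_neg hin, if_neg (by omega), hzero (L+1) b d (by omega)]
  · intro a b d ha
    rw [hAchar, if_neg (by omega)]
    exact hzero a b d (by omega)
  · intro b d
    rw [hBchar]
    split_ifs
    · exact ⟨Int.emod_nonneg _ (by norm_num [pvM]), Int.emod_lt_of_pos _ pvM_pos⟩
    · exact ⟨le_refl 0, pvM_pos⟩
  · intro b d
    rw [hBchar]
    by_cases hin : 1 ≤ b ∧ b < k + 1 ∧ 1 ≤ d ∧ d < m + 1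
    · by_cases hb : b ≤ L + 1
      · left; omega
      · right
        rw [if_pos hin]
        exact pvBV_zero k m L f hS b d (by omega)
    · right; rw [if_neg hin]

-- the main loop invariant, by induction on L
theorem pv_main (k m : Int) (hk : 1 ≤ k) (hm : 1 ≤ m) :
    ∀ (L : Int), 1 ≤ L →
      (∀ b d, pvLook3 ((PySem.List.pyRange 2 (L+1) 1).foldl (pvAStepI k m) (pvDP1 m)) L b d
          = pvLook2 ((PySem.List.pyRange 2 (L+1) 1).foldl
              (fun f _ => pvBStepI k m f) (pvF1 m)) b d)
      ∧ (∀ a b d, L < a →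
          pvLook3 ((PySem.List.pyRange 2 (L+1) 1).foldl (pvAStepI k m) (pvDP1 m)) a b d = 0)
      ∧ pvBounded ((PySem.List.pyRange 2 (L+1) 1).foldl (fun f _ => pvBStepI k m f) (pvF1 m))
      ∧ pvSupp k m L ((PySem.List.pyRange 2 (L+1) 1).foldl
          (fun f _ => pvBStepI k m f) (pvF1 m)) := by
  intro L hL
  induction L, hL using Int.le_induction with
  | base =>
    rw [PySem.List.pyRange_one_eq_nil (by omega)]
    simp only [List.foldl_nil]
    refine ⟨?_, ?_, ?_, ?_⟩
    · intro b d
      rw [pvDP1_char, pvF1_char]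
      split_ifs <;> first | rfl | omega
    · intro a b d ha
      rw [pvDP1_char]
      rw [if_neg (by omega)]
    · intro b d
      rw [pvF1_char]
      split_ifs <;> constructor <;> norm_num [pvM]
    · intro b d
      rw [pvF1_char]
      split_ifs with h
      · left; omega
      · right; rfl
  | succ L hL ih =>
    have hsplit : PySem.List.pyRange 2 (L+1+1) 1 = PySem.List.pyRange 2 (L+1) 1 ++ [L+1] :=
      PySem.List.pyRange_one_succ_right (by omega)
    rw [hsplit, List.foldl_append, List.foldl_append]
    simp only [List.foldl_cons, List.foldl_nil]
    obtain ⟨ih1, ih2, ih3, ih4⟩ := ih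
    exact pv_step k m L hm hL _ _ ih1 ih2 ih3 ih4

-- ===== VERDICT (by name: the statement is the Claim_ definition above) =====
theorem numOfArrays_spec : Claim_equal_numOfArrays := by
  unfold Claim_equal_numOfArrays
  intro n m k _ hpre
  unfold Spec_numOfArrays numOfArrays numOfArrays_alt
  by_cases hk0 : k = 0
  · rw [if_pos hk0, if_pos (by omega)]
  · rw [if_neg hk0]
    by_cases hm : m ≤ 0
    · rw [if_pos (by omega)]
      rw [PySem.List.pyRange_one_eq_nil (show (m:Int) + 1 ≤ 1 by omega)]
      rfl
    · have hnk : 1 ≤ n ∧ 1 ≤ k := by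
        rcases hpre with h | h | h
        · exact absurd h hk0
        · omega
        · exact h
      rw [if_neg (by omega)]
      obtain ⟨main1, _, _, _⟩ := pv_main k m hnk.2 (by omega) n hnk.1
      have hne : PySem.List.pyRange 1 (m+1) 1 ≠ [] := by
        rw [PySem.List.pyRange_one_cons (by omega)]; simp
      rw [pv_foldl_mod_sum (fun i =>
            pvLook3 ((PySem.List.pyRange 2 (n+1) 1).foldl (pvAStepI k m) (pvDP1 m)) n k i)
          _ 0 hne]
      show _ = List.foldl
          (fun s j => s + pvLook2 ((PySem.List.pyRange 2 (n+1) 1).foldl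
              (fun f _ => pvBStepI k m f) (pvF1 m)) k j)
          0 (PySem.List.pyRange 1 (m+1) 1) % pvM
      rw [PySem.List.foldl_add (PySem.List.pyRange 1 (m+1) 1)
          (fun j => pvLook2 ((PySem.List.pyRange 2 (n+1) 1).foldl
              (fun f _ => pvBStepI k m f) (pvF1 m)) k j) 0]
      rw [zero_add, zero_add]
      congr 1
      exact congrArg List.sum (List.map_congr_left (fun i _ => main1 k i))
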